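-- pv_equiv track=rewrite | github.com/simohnf/pythonExperiments | localMin.py | localMin
-- ===== SOURCE A (Python) =====
-- def localMin( numbers, n = -1000, rowT = 0, rowB = -10000, colL = 0, colR = -10000 ):
--     if n == -1000: n = len( numbers )
--     if ( rowB == -10000 ): rowB = len( numbers ) - 1
--     if ( colR == -10000 ): colR = len( numbers ) - 1
--     if n <= 1:
--         return ( numbers[ rowT ][ colL ], rowT, colL )
--     hn = int(n/2)
--     colL = max( 0, colL )
--     colR = min( len( numbers ) - 1, colR )
--     rowT = max( 0, rowT )
--     rowB = min( len( numbers ) - 1, rowB )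
--     midCol = int( ( colR - colL ) / 2 ) + colL
--     midRow = int( ( rowB - rowT ) / 2 ) + rowT
--     minc = colL
--     maxCR = len( numbers )
--     for col in range( colL, colR + 1 ):
--         if ( numbers[ midRow ][ col ] < numbers[ midRow ][ minc ] ):
--             minc = col
--     minr = 0
--     row = hn + rowT
--     if numbers[ midRow - 1 ][ minc ] < numbers[ midRow + 1 ][ minc ]:
--         minr = midRow - 1
--     else: minr = midRow + 1
--     if numbers[ midRow ][ minc ] < numbers[ minr ][ minc ]:
--         return numbers[ midRow ][ minc ], midRow, minc
--     rowT = minr - int( hn / 2 )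
--     rowB = minr + int( hn / 2 )
--     colL = minc - int( hn / 2 )
--     colR = minc + int( hn / 2 )
--     return localMin( numbers, hn, rowT, rowB, colL, colR )
-- ===== SOURCE B (Python) =====
-- def localMin(numbers, n=-1000, rowT=0, rowB=-10000, colL=0, colR=-10000):
--     # Iterative rewrite: default-sentinel substitution happens once up front,
--     # then an explicit loop replaces the recursion; the row scan uses min(..., key=...).
--     size = len(numbers)
--     if n == -1000: n = size
--     if rowB == -10000: rowB = size - 1
--     if colR == -10000: colR = size - 1
--     while n > 1:
--         hn = int(n / 2)
--         half = int(hn / 2)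
--         rowT, rowB = max(0, rowT), min(size - 1, rowB)
--         colL, colR = max(0, colL), min(size - 1, colR)
--         midRow = int((rowB - rowT) / 2) + rowT
--         row = numbers[midRow]
--         minc = min(range(colL, colR + 1), key=lambda c: row[c])
--         if numbers[midRow - 1][minc] < numbers[midRow + 1][minc]:
--             minr = midRow - 1
--         else:
--             minr = midRow + 1
--         if row[minc] < numbers[minr][minc]:
--             return (row[minc], midRow, minc)
--         n, rowT, rowB, colL, colR = hn, minr - half, minr + half, minc - half, minc + half
--     return (numbers[rowT][colL], rowT, colL)
-- ===== Notes on version B (the rewrite author's own statement) =====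
-- stated objective: alternative
-- what changed: B replaces A's self-recursion (which re-applies the default-sentinel substitutions at every level) with a single up-front sentinel substitution followed by an explicit while-loop, and replaces A's manual first-minimum scan of the middle row with min(range(colL, colR+1), key=...).
-- outside the precondition, e.g. on localMin([[9999, 0], [0, 8]], 3, -1, 8, -1, -3): A returns (0, 1, 0), B raises ValueError; on localMin([[1, 2], [3]], -1000, 0, -10000, 0, -10000): A returns (1, 0, 0), B returns (1, 0, 0)
import Mathlib
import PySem

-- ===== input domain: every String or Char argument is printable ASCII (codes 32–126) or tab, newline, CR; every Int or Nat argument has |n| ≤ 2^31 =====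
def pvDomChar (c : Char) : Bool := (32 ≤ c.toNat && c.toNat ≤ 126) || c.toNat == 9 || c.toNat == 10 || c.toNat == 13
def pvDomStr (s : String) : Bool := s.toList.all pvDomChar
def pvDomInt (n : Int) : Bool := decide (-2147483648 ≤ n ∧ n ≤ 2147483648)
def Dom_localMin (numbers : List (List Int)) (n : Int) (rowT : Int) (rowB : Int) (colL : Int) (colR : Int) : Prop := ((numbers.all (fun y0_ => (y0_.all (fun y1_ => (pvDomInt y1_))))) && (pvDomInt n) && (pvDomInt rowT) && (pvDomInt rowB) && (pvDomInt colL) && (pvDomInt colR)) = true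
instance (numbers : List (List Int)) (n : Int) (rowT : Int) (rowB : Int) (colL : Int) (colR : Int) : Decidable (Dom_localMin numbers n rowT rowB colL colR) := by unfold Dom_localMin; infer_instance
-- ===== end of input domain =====

-- B replaces A's self-recursion (which re-tests the default sentinels at every level) by a single
-- sentinel substitution followed by an explicit loop, and finds the row minimum with min(range, key=...)
-- instead of A's manual scan; objective: alternative decomposition (same cost).


-- ===== PORT A =====
-- A's row scan: 'minc = colL; for col in range(colL, colR+1): if numbers[midRow][col] < numbers[midRow][minc]: minc = col'
-- (row fetched once; Python indexes numbers[midRow] repeatedly but it is the same value).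
-- none = IndexError on an element access.
def scanA (row : List Int) (cl cr : Int) : Option Int :=
  (PySem.List.pyRange cl (cr + 1) 1).foldl
    (fun acc col => acc.bind fun mc =>
      (PySem.List.pyGet? row col).bind fun v =>
        (PySem.List.pyGet? row mc).map fun w => if v < w then col else mc)
    (some cl)

-- Literal port of A; Option result: none exactly where the Python raises (IndexError somewhere).
-- The Nat fuel only makes the recursion structural: A's state halves n every level, so the
-- n+1 fuel supplied by localMin below is never exhausted (a totality guard, not an algorithm change).
def goA : List (List Int) → Nat → Int → Int → Int → Int → Int → Option (Int × Int × Int)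
  | _, 0, _, _, _, _, _ => none
  | numbers, fuel + 1, n, rowT, rowB, colL, colR =>
    let L : Int := numbers.length
    let n1 := if n = -1000 then L else n
    let rB1 := if rowB = -10000 then L - 1 else rowB
    let cR1 := if colR = -10000 then L - 1 else colR
    if n1 ≤ 1 then
      (PySem.List.pyGet? numbers rowT).bind fun r =>
        (PySem.List.pyGet? r colL).map fun v => (v, rowT, colL)
    else
      let hn := PySem.Int.truncdiv n1 2
      let cL2 := max 0 colL
      let cR2 := min (L - 1) cR1
      let rT2 := max 0 rowT
      let rB2 := min (L - 1) rB1
      let _midCol := PySem.Int.truncdiv (cR2 - cL2) 2 + cL2   -- computed by A, never used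
      let midRow := PySem.Int.truncdiv (rB2 - rT2) 2 + rT2
      match PySem.List.pyGet? numbers midRow with
      | none => none
      | some row =>
        match scanA row cL2 cR2 with
        | none => none
        | some minc =>
          match (PySem.List.pyGet? numbers (midRow - 1)).bind (fun r => PySem.List.pyGet? r minc),
                (PySem.List.pyGet? numbers (midRow + 1)).bind (fun r => PySem.List.pyGet? r minc) with
          | some up, some dn =>
            let minr := if up < dn then midRow - 1 else midRow + 1
            match PySem.List.pyGet? row minc,
                  (PySem.List.pyGet? numbers minr).bind (fun r => PySem.List.pyGet? r minc) with
            | some mv, some nv =>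
              if mv < nv then some (mv, midRow, minc)
              else
                let h2 := PySem.Int.truncdiv hn 2
                goA numbers fuel hn (minr - h2) (minr + h2) (minc - h2) (minc + h2)
            | _, _ => none
          | _, _ => none

def localMin (numbers : List (List Int)) (n : Int) (rowT : Int) (rowB : Int) (colL : Int) (colR : Int) : Int × Int × Int :=
  (goA numbers ((if n = -1000 then numbers.length else n.toNat) + 1) n rowT rowB colL colR).getD (0, 0, 0)

-- ===== PORT B =====
-- B's scan: 'minc = min(range(colL, colR+1), key=lambda c: row[c])': materialise the (index, value)
-- pairs (none as soon as one access raises, as Python's min would), then first minimum by value.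
def scanB (row : List Int) (cl cr : Int) : Option Int :=
  ((PySem.List.pyRange cl (cr + 1) 1).mapM
      (fun c => (PySem.List.pyGet? row c).map (fun v => (c, v)))).bind fun pairs =>
    (PySem.List.min? pairs Prod.snd).map Prod.fst

-- B's 'while n > 1' loop (sentinels already substituted by the caller localMin_alt);
-- the same totality fuel as in A's port.
def loopB : List (List Int) → Nat → Int → Int → Int → Int → Int → Option (Int × Int × Int)
  | _, 0, _, _, _, _, _ => none
  | numbers, fuel + 1, n, rowT, rowB, colL, colR =>
    let L : Int := numbers.length
    if 1 < n then
      let hn := PySem.Int.truncdiv n 2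
      let half := PySem.Int.truncdiv hn 2
      let rT2 := max 0 rowT
      let rB2 := min (L - 1) rowB
      let cL2 := max 0 colL
      let cR2 := min (L - 1) colR
      let midRow := PySem.Int.truncdiv (rB2 - rT2) 2 + rT2
      (PySem.List.pyGet? numbers midRow).bind fun row =>
      (scanB row cL2 cR2).bind fun minc =>
      ((PySem.List.pyGet? numbers (midRow - 1)).bind (fun r => PySem.List.pyGet? r minc)).bind fun up =>
      ((PySem.List.pyGet? numbers (midRow + 1)).bind (fun r => PySem.List.pyGet? r minc)).bind fun dn =>
      let minr := if up < dn then midRow - 1 else midRow + 1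
      (PySem.List.pyGet? row minc).bind fun mv =>
      ((PySem.List.pyGet? numbers minr).bind (fun r => PySem.List.pyGet? r minc)).bind fun nv =>
      if mv < nv then some (mv, midRow, minc)
      else loopB numbers fuel hn (minr - half) (minr + half) (minc - half) (minc + half)
    else
      (PySem.List.pyGet? numbers rowT).bind fun r =>
        (PySem.List.pyGet? r colL).map fun v => (v, rowT, colL)

def localMin_alt (numbers : List (List Int)) (n : Int) (rowT : Int) (rowB : Int) (colL : Int) (colR : Int) : Int × Int × Int :=
  let L : Int := numbers.length
  let n1 := if n = -1000 then L else n
  let rB1 := if rowB = -10000 then L - 1 else rowB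
  let cR1 := if colR = -10000 then L - 1 else colR
  (loopB numbers ((if n = -1000 then numbers.length else n.toNat) + 1) n1 rowT rB1 colL cR1).getD (0, 0, 0)

-- ===== PRECONDITION & SPEC =====
-- Pre_ excludes inputs on which Python A raises (IndexError out of the grid), plus inputs A returns
-- on only by accident of its clamping: non-square-ish grids (a row shorter than the row count) and
-- window bounds outside the divide-and-conquer invariant — in particular an empty column window,
-- where A's leftover 'minc = colL' happens to work while B's min() of an empty range raises ValueError.
def Pre_localMin (numbers : List (List Int)) (n : Int) (rowT : Int) (rowB : Int) (colL : Int) (colR : Int) : Prop :=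
  let L : Int := numbers.length
  let n1 := if n = -1000 then L else n
  let rB1 := if rowB = -10000 then L - 1 else rowB
  let cR1 := if colR = -10000 then L - 1 else colR
  if n1 ≤ 1 then
    ((PySem.List.pyGet? numbers rowT).any
      (fun r => decide (-(r.length : Int) ≤ colL ∧ colL < (r.length : Int)))) = true
  else
    (∀ r ∈ numbers, L ≤ (r.length : Int)) ∧
    max 0 rowT ≤ min (L - 1) rB1 ∧ max 0 rowT ≤ L - 2 ∧ max 0 colL ≤ min (L - 1) cR1
instance (numbers : List (List Int)) (n : Int) (rowT : Int) (rowB : Int) (colL : Int) (colR : Int) : Decidable (Pre_localMin numbers n rowT rowB colL colR) := by unfold Pre_localMin; infer_instance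

def pvWitness_localMin : List (List Int) × Int × Int × Int × Int × Int :=
  ([[5, 4], [3, 2]], -1000, 0, -10000, 0, -10000)

def Spec_localMin (numbers : List (List Int)) (n : Int) (rowT : Int) (rowB : Int) (colL : Int) (colR : Int) (out : Int × Int × Int) : Prop := out = localMin_alt numbers n rowT rowB colL colR
instance (numbers : List (List Int)) (n : Int) (rowT : Int) (rowB : Int) (colL : Int) (colR : Int) (out : Int × Int × Int) : Decidable (Spec_localMin numbers n rowT rowB colL colR out) := by unfold Spec_localMin; infer_instance

-- ===== CLAIM (what is proved, stated in full; the proofs are below) =====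
def Claim_equal_localMin : Prop := ∀ (numbers : List (List Int)) (n : Int) (rowT : Int) (rowB : Int) (colL : Int) (colR : Int), Dom_localMin numbers n rowT rowB colL colR → Pre_localMin numbers n rowT rowB colL colR → Spec_localMin numbers n rowT rowB colL colR (localMin numbers n rowT rowB colL colR)

-- ===== LEMMAS AND PROOFS =====

-- the arithmetic invariant A's recursion maintains (only constrains states that recurse again)
def InvLM (L n rT rB cL cR : Int) : Prop :=
  1 < n → (max 0 rT ≤ min (L - 1) rB ∧ max 0 rT ≤ L - 2 ∧ max 0 cL ≤ min (L - 1) cR)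

lemma foldA_none (row : List Int) (l : List Int) :
    l.foldl (fun acc col => acc.bind fun mc =>
      (PySem.List.pyGet? row col).bind fun v =>
        (PySem.List.pyGet? row mc).map fun w => if v < w then col else mc) none = none := by
  induction l with
  | nil => rfl
  | cons c t ih => simpa using ih

lemma foldA_bad (row : List Int) (l : List Int) (m : Int)
    (hbad : ∃ c ∈ l, PySem.List.pyGet? row c = none) :
    l.foldl (fun acc col => acc.bind fun mc =>
      (PySem.List.pyGet? row col).bind fun v =>
        (PySem.List.pyGet? row mc).map fun w => if v < w then col else mc) (some m) = none := by
  induction l generalizing m with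
  | nil => simp at hbad
  | cons c t ih =>
    obtain ⟨c0, hc0, hn0⟩ := hbad
    simp only [List.foldl_cons, Option.bind_some]
    cases hc : PySem.List.pyGet? row c with
    | none => simp only [hc, Option.bind_none]; exact foldA_none row t
    | some v =>
      cases hm : PySem.List.pyGet? row m with
      | none => simp only [hc, hm, Option.bind_some, Option.map_none]; exact foldA_none row t
      | some w =>
        simp only [hc, hm, Option.bind_some, Option.map_some]
        apply ih
        refine ⟨c0, ?_, hn0⟩
        rcases List.mem_cons.mp hc0 with h | h
        · exact absurd hn0 (by rw [h, hc]; simp)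
        · exact h

lemma foldA_ok (row : List Int) (l : List Int) (m : Int)
    (hm : (PySem.List.pyGet? row m).isSome)
    (hok : ∀ c ∈ l, (PySem.List.pyGet? row c).isSome) :
    l.foldl (fun acc col => acc.bind fun mc =>
      (PySem.List.pyGet? row col).bind fun v =>
        (PySem.List.pyGet? row mc).map fun w => if v < w then col else mc) (some m)
    = some (l.foldl (fun mc c =>
        if (PySem.List.pyGet? row c).getD 0 < (PySem.List.pyGet? row mc).getD 0 then c else mc) m) := by
  induction l generalizing m with
  | nil => simp
  | cons c t ih =>
    obtain ⟨v, hv⟩ := Option.isSome_iff_exists.mp (hok c (List.mem_cons_self))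
    obtain ⟨w, hw⟩ := Option.isSome_iff_exists.mp hm
    simp only [List.foldl_cons, Option.bind_some, hv, hw, Option.map_some, Option.getD_some]
    rw [ih]
    · by_cases hlt : v < w
      · rw [if_pos hlt]; simp [hv]
      · rw [if_neg hlt]; exact hm
    · exact fun c' hc' => hok c' (List.mem_cons_of_mem c hc')

lemma mapM_ok (row : List Int) (l : List Int)
    (hok : ∀ c ∈ l, (PySem.List.pyGet? row c).isSome) :
    l.mapM (fun c => (PySem.List.pyGet? row c).map (fun v => (c, v)))
    = some (l.map (fun c => (c, (PySem.List.pyGet? row c).getD 0))) := by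
  induction l with
  | nil => rfl
  | cons c t ih =>
    obtain ⟨v, hv⟩ := Option.isSome_iff_exists.mp (hok c (List.mem_cons_self))
    rw [List.mapM_cons, ih (fun c' hc' => hok c' (List.mem_cons_of_mem c hc'))]
    simp [hv]

lemma mapM_bad (row : List Int) (l : List Int)
    (hbad : ∃ c ∈ l, PySem.List.pyGet? row c = none) :
    l.mapM (fun c => (PySem.List.pyGet? row c).map (fun v => (c, v))) = none := by
  induction l with
  | nil => simp at hbad
  | cons c t ih =>
    obtain ⟨c0, hc0, hn0⟩ := hbad
    rw [List.mapM_cons]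
    cases hc : PySem.List.pyGet? row c with
    | none => simp [hc]
    | some v =>
      have : t.mapM (fun c => (PySem.List.pyGet? row c).map (fun v => (c, v))) = none := by
        apply ih
        refine ⟨c0, ?_, hn0⟩
        rcases List.mem_cons.mp hc0 with h | h
        · exact absurd hn0 (by rw [h, hc]; simp)
        · exact h
      simp [hc, this]

lemma min?_map_step (row : List Int) (l : List Int) :
    ∀ m : Int,
      PySem.List.min? ((m :: l).map (fun c => (c, (PySem.List.pyGet? row c).getD 0))) Prod.snd
      = some (l.foldl (fun mc c =>
          if (PySem.List.pyGet? row c).getD 0 < (PySem.List.pyGet? row mc).getD 0 then c else mc) m,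
          (PySem.List.pyGet? row (l.foldl (fun mc c =>
          if (PySem.List.pyGet? row c).getD 0 < (PySem.List.pyGet? row mc).getD 0 then c else mc) m)).getD 0) := by
  induction l with
  | nil => intro m; simp [PySem.List.min?]
  | cons c t ih =>
    intro m
    have h1 : PySem.List.min? ((m :: c :: t).map (fun c => (c, (PySem.List.pyGet? row c).getD 0))) Prod.snd
        = PySem.List.min? (((if (PySem.List.pyGet? row c).getD 0 < (PySem.List.pyGet? row m).getD 0 then c else m) :: t).map
            (fun c => (c, (PySem.List.pyGet? row c).getD 0))) Prod.snd := by
      simp only [List.map_cons, PySem.List.min?, List.foldl_cons]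
      by_cases hlt : (PySem.List.pyGet? row c).getD 0 < (PySem.List.pyGet? row m).getD 0 <;>
        simp [hlt]
    rw [h1, ih]
    simp only [List.foldl_cons]

lemma foldA_mem (row : List Int) (l : List Int) :
    ∀ (m mc : Int),
      l.foldl (fun acc col => acc.bind fun mc =>
        (PySem.List.pyGet? row col).bind fun v =>
          (PySem.List.pyGet? row mc).map fun w => if v < w then col else mc) (some m) = some mc →
      mc = m ∨ mc ∈ l := by
  induction l with
  | nil => intro m mc hf; left; simpa using hf.symm
  | cons c t ih =>
    intro m mc hf
    simp only [List.foldl_cons, Option.bind_some] at hf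
    cases hc : PySem.List.pyGet? row c with
    | none => rw [hc] at hf; simp only [Option.bind_none] at hf; rw [foldA_none] at hf; cases hf
    | some v =>
      cases hm : PySem.List.pyGet? row m with
      | none =>
        rw [hc, hm] at hf; simp only [Option.bind_some, Option.map_none] at hf
        rw [foldA_none] at hf; cases hf
      | some w =>
        rw [hc, hm] at hf; simp only [Option.bind_some, Option.map_some] at hf
        rcases ih _ _ hf with h | h
        · by_cases hlt : v < w
          · rw [if_pos hlt] at h; right; rw [h]; exact List.mem_cons_self
          · rw [if_neg hlt] at h; left; exact h
        · right; exact List.mem_cons_of_mem c h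

-- the two scans agree on a nonempty window
lemma scan_eq (row : List Int) (cl cr : Int) (h : cl ≤ cr) :
    scanA row cl cr = scanB row cl cr := by
  unfold scanA scanB
  have hl : PySem.List.pyRange cl (cr + 1) 1 = cl :: PySem.List.pyRange (cl + 1) (cr + 1) 1 :=
    PySem.List.pyRange_one_cons (by omega)
  by_cases hall : ∀ c ∈ PySem.List.pyRange cl (cr + 1) 1, (PySem.List.pyGet? row c).isSome
  · have hcl : (PySem.List.pyGet? row cl).isSome := hall cl (by rw [hl]; exact List.mem_cons_self)
    rw [mapM_ok row _ hall, foldA_ok row _ cl hcl hall]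
    simp only [Option.bind_some]
    rw [hl, min?_map_step]
    simp only [List.foldl_cons, Option.map_some, ite_self]
  · push_neg at hall
    obtain ⟨c0, hc0, hnone⟩ := hall
    rw [mapM_bad row _ ⟨c0, hc0, Option.not_isSome_iff_eq_none.mp hnone⟩,
        foldA_bad row _ cl ⟨c0, hc0, Option.not_isSome_iff_eq_none.mp hnone⟩]
    rfl

-- a successful A-scan yields an index inside the window
lemma scanA_bounds (row : List Int) (cl cr mc : Int) (h : cl ≤ cr)
    (hs : scanA row cl cr = some mc) : cl ≤ mc ∧ mc ≤ cr := by
  unfold scanA at hs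
  rcases foldA_mem row _ _ _ hs with h1 | h1
  · omega
  · have := PySem.List.mem_pyRange_one.mp h1
    omega

-- main equivalence: A's recursion = B's loop on sentinel-free states satisfying the invariant
lemma goA_eq_loopB (numbers : List (List Int)) :
    ∀ (k : Nat) (n rT rB cL cR : Int),
      n ≠ -1000 → rB ≠ -10000 → cR ≠ -10000 →
      InvLM (numbers.length : Int) n rT rB cL cR →
      goA numbers k n rT rB cL cR = loopB numbers k n rT rB cL cR := by
  intro k
  induction k with
  | zero => intro n rT rB cL cR _ _ _ _; rfl
  | succ k ih =>
    intro n rT rB cL cR hn hrB hcR hinv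
    simp only [goA, loopB]
    simp only [if_neg hn, if_neg hrB, if_neg hcR]
    by_cases hb : n ≤ 1
    · rw [if_pos hb, if_neg (by omega : ¬ (1 : Int) < n)]
    · rw [if_neg hb, if_pos (by omega : (1 : Int) < n)]
      obtain ⟨hr1, hr2, hc1⟩ := hinv (by omega)
      have hcc : max 0 cL ≤ min ((numbers.length : Int) - 1) cR := hc1
      have hscanB : ∀ row : List Int,
          scanB row (max 0 cL) (min ((numbers.length : Int) - 1) cR)
          = scanA row (max 0 cL) (min ((numbers.length : Int) - 1) cR) :=
        fun row => (scan_eq row _ _ (by omega)).symm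
      simp only [hscanB]
      -- arithmetic facts about the midpoint
      have htd1 : PySem.Int.truncdiv (min ((numbers.length : Int) - 1)
            (if rB = -10000 then (numbers.length : Int) - 1 else rB) - max 0 rT) 2
          = (min ((numbers.length : Int) - 1) (if rB = -10000 then (numbers.length : Int) - 1 else rB)
             - max 0 rT) / 2 := by
        rw [if_neg hrB]
        exact Int.tdiv_eq_ediv_of_nonneg (by omega)
      rw [if_neg hrB] at htd1
      have htdn : PySem.Int.truncdiv n 2 = n / 2 := Int.tdiv_eq_ediv_of_nonneg (by omega)
      have htdh : PySem.Int.truncdiv (PySem.Int.truncdiv n 2) 2 = (n / 2) / 2 := by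
        rw [htdn]; exact Int.tdiv_eq_ediv_of_nonneg (by omega)
      set M := PySem.Int.truncdiv (min ((numbers.length : Int) - 1) rB - max 0 rT) 2 + max 0 rT
        with hM
      have hmidlo : 0 ≤ M := by rw [hM, htd1]; omega
      have hmidhi : M ≤ (numbers.length : Int) - 2 := by rw [hM, htd1]; omega
      cases hrow : PySem.List.pyGet? numbers M with
      | none => simp [hrow]
      | some row =>
        simp only [hrow, Option.bind_some]
        cases hscn : scanA row (max 0 cL) (min ((numbers.length : Int) - 1) cR) with
        | none => simp [hscn]
        | some minc =>
          obtain ⟨hm1, hm2⟩ := scanA_bounds row _ _ minc (by omega) hscn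
          simp only [hscn, Option.bind_some]
          cases hup : (PySem.List.pyGet? numbers (M - 1)).bind
              (fun r => PySem.List.pyGet? r minc) with
          | none => simp [hup]
          | some up =>
            simp only [hup, Option.bind_some]
            cases hdn : (PySem.List.pyGet? numbers (M + 1)).bind
                (fun r => PySem.List.pyGet? r minc) with
            | none => simp [hdn]
            | some dn =>
              simp only [hdn, Option.bind_some]
              cases hmv : PySem.List.pyGet? row minc with
              | none => simp [hmv]
              | some mv =>
                simp only [hmv, Option.bind_some]
                cases hnv : (PySem.List.pyGet? numbers (if up < dn then M - 1 else M + 1)).bind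
                    (fun r => PySem.List.pyGet? r minc) with
                | none => simp [hnv]
                | some nv =>
                  simp only [hnv, Option.bind_some]
                  by_cases hlt : mv < nv
                  · rw [if_pos hlt, if_pos hlt]
                  · rw [if_neg hlt, if_neg hlt]
                    have hminr : -1 ≤ (if up < dn then M - 1 else M + 1)
                        ∧ (if up < dn then M - 1 else M + 1) ≤ (numbers.length : Int) - 1 := by
                      split_ifs <;> omega
                    apply ih
                    · rw [htdn]; omega
                    · rw [htdh]; omega
                    · rw [htdh]; omega
                    · intro h2
                      rw [htdn] at h2
                      simp only [htdh]
                      refine ⟨?_, ?_, ?_⟩ <;> omega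

-- ===== VERDICT (by name: the statement is the Claim_ definition above) =====
theorem localMin_spec : Claim_equal_localMin := by
  unfold Claim_equal_localMin
  intro numbers n rT rB cL cR _ hpre
  unfold Spec_localMin localMin localMin_alt
  have e1 : (if (if n = -1000 then (numbers.length : Int) else n) = -1000
      then (numbers.length : Int) else (if n = -1000 then (numbers.length : Int) else n))
      = (if n = -1000 then (numbers.length : Int) else n) := by split_ifs <;> omega
  have e2 : (if (if rB = -10000 then (numbers.length : Int) - 1 else rB) = -10000
      then (numbers.length : Int) - 1 else (if rB = -10000 then (numbers.length : Int) - 1 else rB))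
      = (if rB = -10000 then (numbers.length : Int) - 1 else rB) := by split_ifs <;> omega
  have e3 : (if (if cR = -10000 then (numbers.length : Int) - 1 else cR) = -10000
      then (numbers.length : Int) - 1 else (if cR = -10000 then (numbers.length : Int) - 1 else cR))
      = (if cR = -10000 then (numbers.length : Int) - 1 else cR) := by split_ifs <;> omega
  have hsub : goA numbers ((if n = -1000 then numbers.length else n.toNat) + 1) n rT rB cL cR
      = goA numbers ((if n = -1000 then numbers.length else n.toNat) + 1)
          (if n = -1000 then (numbers.length : Int) else n) rT
          (if rB = -10000 then (numbers.length : Int) - 1 else rB) cL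
          (if cR = -10000 then (numbers.length : Int) - 1 else cR) := by
    simp only [goA]
    simp only [e1, e2, e3]
  have hinv : InvLM (numbers.length : Int) (if n = -1000 then (numbers.length : Int) else n) rT
      (if rB = -10000 then (numbers.length : Int) - 1 else rB) cL
      (if cR = -10000 then (numbers.length : Int) - 1 else cR) := by
    intro h2
    unfold Pre_localMin at hpre
    simp only [] at hpre
    rw [if_neg (by omega)] at hpre
    exact hpre.2
  have heq := goA_eq_loopB numbers
      ((if n = -1000 then numbers.length else n.toNat) + 1)
      (if n = -1000 then (numbers.length : Int) else n) rT
      (if rB = -10000 then (numbers.length : Int) - 1 else rB) cL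
      (if cR = -10000 then (numbers.length : Int) - 1 else cR)
      (by split_ifs <;> omega) (by split_ifs <;> omega) (by split_ifs <;> omega) hinv
  rw [hsub, heq]
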